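-- pv_equiv track=rewrite | github.com/Alexeevich32/lesson8 | module_9_6.py | all_v1
-- ===== SOURCE A (Python) =====
-- import itertools
--
-- def all_v1(text):
--     for i in range(len(text)):
--       combinations = []
--       combinations = itertools.combinations(text, i + 1)
--       subsequences = [''.join(c) for c in combinations]
--       declimer = f'\n'
--       res = declimer.join(subsequences)
--       yield res
-- ===== SOURCE B (Python) =====
-- def all_v1(text):
--     # one-pass powerset enumeration (pick-first order), then per-length filtering;
--     # emits exactly itertools.combinations' increasing-index order for each length
--     subs = ['']
--     for ch in reversed(text):
--         subs = [ch + t for t in subs] + subs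
--     for r in range(1, len(text) + 1):
--         yield '\n'.join([s for s in subs if len(s) == r])
-- ===== Notes on version B (the rewrite author's own statement) =====
-- stated objective: alternative
-- what changed: Replaces the per-length itertools.combinations calls with a single pick-first powerset enumeration built in one pass over the reversed text, from which each length's block is filtered in the same increasing-index order.
import Mathlib
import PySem

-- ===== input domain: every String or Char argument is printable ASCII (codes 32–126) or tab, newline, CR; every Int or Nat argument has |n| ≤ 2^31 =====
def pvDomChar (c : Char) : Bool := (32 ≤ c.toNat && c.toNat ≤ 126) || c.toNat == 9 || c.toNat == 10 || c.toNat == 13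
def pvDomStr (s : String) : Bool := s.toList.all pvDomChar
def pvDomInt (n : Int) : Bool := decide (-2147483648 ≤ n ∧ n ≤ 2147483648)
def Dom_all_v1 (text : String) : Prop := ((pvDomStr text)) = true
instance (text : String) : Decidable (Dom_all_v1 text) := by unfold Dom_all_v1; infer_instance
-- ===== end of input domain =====

-- B replaces per-length itertools.combinations calls with one powerset pass plus per-length filtering (alternative decomposition, same cost).
-- The generator is ported as the list of its yielded values.

-- ===== PORT A =====
-- itertools.combinations(text, r) ported as the standard pick-or-skip recursion,
-- which emits exactly itertools' increasing-index (lexicographic-by-index) order.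
def pyCombinations : List Char → Nat → List (List Char)
  | _, 0 => [[]]
  | [], _ + 1 => []
  | c :: s, r + 1 => (pyCombinations s r).map (fun t => c :: t) ++ pyCombinations s (r + 1)

def all_v1 (text : String) : List String :=
  (List.range text.toList.length).map (fun i =>
    PySem.Str.join "\n" ((pyCombinations text.toList (i + 1)).map String.mk))

-- ===== PORT B =====
def all_v1_alt (text : String) : List String :=
  let subs := text.toList.reverse.foldl
    (fun subs ch => subs.map (fun t => ch :: t) ++ subs) [[]]
  (List.range text.toList.length).map (fun i =>
    PySem.Str.join "\n" ((subs.filter (fun s => s.length == i + 1)).map String.mk))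

-- ===== PRECONDITION & SPEC =====
def Spec_all_v1 (text : String) (out : List String) : Prop := out = all_v1_alt text
instance (text : String) (out : List String) : Decidable (Spec_all_v1 text out) := by unfold Spec_all_v1; infer_instance

-- ===== CLAIM (what is proved, stated in full; the proofs are below) =====
def Claim_equal_all_v1 : Prop := ∀ (text : String), Dom_all_v1 text → Spec_all_v1 text (all_v1 text)

-- ===== LEMMAS AND PROOFS =====

-- proof-local name for B's powerset fold
def pvPowerset : List Char → List (List Char)
  | [] => [[]]
  | c :: s => (pvPowerset s).map (fun t => c :: t) ++ pvPowerset s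

theorem pvPowerset_eq_foldr (l : List Char) :
    l.foldr (fun ch subs => subs.map (fun t => ch :: t) ++ subs) [[]] = pvPowerset l := by
  induction l with
  | nil => rfl
  | cons c s ih => rw [List.foldr_cons, ih]; rfl

theorem filter_powerset_eq_comb (l : List Char) :
    ∀ r : Nat, (pvPowerset l).filter (fun s => s.length == r) = pyCombinations l r := by
  induction l with
  | nil =>
      intro r
      cases r with
      | zero => simp [pvPowerset, pyCombinations]
      | succ r' => simp [pvPowerset, pyCombinations]
  | cons c s ih =>
      intro r
      rw [pvPowerset, List.filter_append, List.filter_map]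
      cases r with
      | zero =>
          rw [pyCombinations]
          have h1 : (pvPowerset s).filter ((fun s : List Char => s.length == 0) ∘
              (fun t => c :: t)) = [] := by
            rw [List.filter_eq_nil_iff]
            intro a _
            simp [Function.comp]
          rw [h1, ih 0, pyCombinations]
          rfl
      | succ r' =>
          rw [pyCombinations]
          have h1 : ((fun s : List Char => s.length == r' + 1) ∘ (fun t => c :: t)) =
              (fun t : List Char => t.length == r') := by
            funext t
            simp [Function.comp]
          rw [h1, ih r', ih (r' + 1)]

theorem pv_subs_eq (l : List Char) :
    l.reverse.foldl (fun subs ch => subs.map (fun t => ch :: t) ++ subs) [[]] = pvPowerset l := by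
  rw [List.foldl_reverse]
  exact pvPowerset_eq_foldr l

-- ===== VERDICT (by name: the statement is the Claim_ definition above) =====
theorem all_v1_spec : Claim_equal_all_v1 := by
  intro text _
  show all_v1 text = all_v1_alt text
  unfold all_v1 all_v1_alt
  simp only [pv_subs_eq, filter_powerset_eq_comb]
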